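-- pv_equiv track=rewrite | github.com/needitem/ReSource | app/pipeline/module_classifier.py | _looks_ui_asset_blob
-- ===== SOURCE A (Python) =====
-- def _looks_ui_asset_blob(strings: list[str]) -> bool:
--     if len(strings) < 2:
--         return False
--     long_strings = [s for s in strings if len(s) >= 64]
--     if not long_strings:
--         return False
--     joined = " ".join(long_strings)
--     return "xxxxxxx" in joined.lower() and "..-" in joined
-- ===== SOURCE B (Python) =====
-- def _looks_ui_asset_blob(strings: list[str]) -> bool:
--     if len(strings) < 2:
--         return False
--     has_x = False
--     has_dash = False
--     for s in strings:
--         if len(s) >= 64: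
--             if "xxxxxxx" in s.lower():
--                 has_x = True
--             if "..-" in s:
--                 has_dash = True
--     return has_x and has_dash
-- ===== Notes on version B (the rewrite author's own statement) =====
-- stated objective: simpler
-- what changed: Replaced the filter-comprehension + ' '.join + two scans over the joined blob by a single pass over the strings that sets two per-string flags; this is exact because neither pattern contains a space, so joining can never create a cross-string match.
import Mathlib
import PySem

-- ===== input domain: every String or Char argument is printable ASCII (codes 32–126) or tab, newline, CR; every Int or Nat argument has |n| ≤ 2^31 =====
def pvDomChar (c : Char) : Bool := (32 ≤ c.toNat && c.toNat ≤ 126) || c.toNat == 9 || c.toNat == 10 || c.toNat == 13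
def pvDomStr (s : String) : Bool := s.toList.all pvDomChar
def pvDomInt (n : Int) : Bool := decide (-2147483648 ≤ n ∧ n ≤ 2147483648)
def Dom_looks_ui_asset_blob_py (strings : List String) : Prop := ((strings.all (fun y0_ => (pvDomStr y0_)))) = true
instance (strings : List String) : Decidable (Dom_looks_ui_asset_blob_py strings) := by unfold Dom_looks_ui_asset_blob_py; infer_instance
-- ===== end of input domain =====

-- B replaces A's filter + ' '.join + two scans over the joined blob by one pass with two
-- per-string flags (exact: neither pattern contains a space, so joining cannot create a match).

-- ===== PORT A =====
def looks_ui_asset_blob_py (strings : List String) : Bool :=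
  if strings.length < 2 then false
  else
    let long_strings := strings.filter (fun s => 64 ≤ PySem.Str.len s)
    if long_strings = [] then false
    else
      let joined := PySem.Str.join " " long_strings
      PySem.Str.isIn "xxxxxxx" (PySem.Str.lower joined) && PySem.Str.isIn "..-" joined

-- ===== PORT B =====
-- the for-loop of Source B over the two flags
def blobScan : List String → Bool → Bool → Bool
  | [], has_x, has_dash => has_x && has_dash
  | s :: rest, has_x, has_dash =>
    if 64 ≤ PySem.Str.len s then
      blobScan rest
        (if PySem.Str.isIn "xxxxxxx" (PySem.Str.lower s) then true else has_x)
        (if PySem.Str.isIn "..-" s then true else has_dash)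
    else blobScan rest has_x has_dash

def looks_ui_asset_blob_py_alt (strings : List String) : Bool :=
  if strings.length < 2 then false
  else blobScan strings false false

-- ===== PRECONDITION & SPEC =====
def Spec_looks_ui_asset_blob_py (strings : List String) (out : Bool) : Prop := out = looks_ui_asset_blob_py_alt strings
instance (strings : List String) (out : Bool) : Decidable (Spec_looks_ui_asset_blob_py strings out) := by unfold Spec_looks_ui_asset_blob_py; infer_instance

-- ===== CLAIM (what is proved, stated in full; the proofs are below) =====
def Claim_equal_looks_ui_asset_blob_py : Prop := ∀ (strings : List String), Dom_looks_ui_asset_blob_py strings → Spec_looks_ui_asset_blob_py strings (looks_ui_asset_blob_py strings)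

-- ===== LEMMAS AND PROOFS =====

-- a pattern avoiding c and prefixing xs ++ c :: ys must already prefix xs
theorem pv_prefix_append_cons {α : Type} {c : α} {p xs ys : List α} (hc : c ∉ p)
    (h : p <+: xs ++ c :: ys) : p <+: xs := by
  induction p generalizing xs with
  | nil => exact List.nil_prefix
  | cons d p' ih =>
    cases xs with
    | nil =>
      rw [List.nil_append, List.cons_prefix_cons] at h
      exact absurd (h.1 ▸ List.mem_cons_self) hc
    | cons a xs' =>
      rw [List.cons_append, List.cons_prefix_cons] at h
      exact List.cons_prefix_cons.mpr
        ⟨h.1, ih (fun hm => hc (List.mem_cons_of_mem _ hm)) h.2⟩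

-- a pattern avoiding the separator is an infix of xs ++ c :: ys iff of xs or of ys
theorem pv_infix_append_cons_iff {α : Type} {c : α} {p xs ys : List α} (hc : c ∉ p) :
    p <:+: xs ++ c :: ys ↔ p <:+: xs ∨ p <:+: ys := by
  constructor
  · intro h
    induction xs with
    | nil =>
      rw [List.nil_append] at h
      rcases List.infix_cons_iff.mp h with hp | h'
      · cases p with
        | nil => exact Or.inl List.nil_infix
        | cons d p' =>
          rw [List.cons_prefix_cons] at hp
          exact absurd (hp.1 ▸ List.mem_cons_self) hc
      · exact Or.inr h'
    | cons a xs' ih =>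
      rw [List.cons_append] at h
      rcases List.infix_cons_iff.mp h with hp | h'
      · exact Or.inl (pv_prefix_append_cons hc (by simpa using hp)).isInfix
      · rcases ih h' with h1 | h2
        · exact Or.inl (List.infix_cons_iff.mpr (Or.inr h1))
        · exact Or.inr h2
  · rintro (h | h)
    · exact List.infix_append_of_infix_left h
    · exact List.infix_append_of_infix_right (List.infix_cons_iff.mpr (Or.inr h))

-- scanning the space-join for a spaceless pattern = scanning each piece
theorem pv_isIn_join {p : List Char} (hp : (' ' : Char) ∉ p) :
    ∀ L : List (List Char), L ≠ [] →
      PySem.Chars.isIn p (PySem.Chars.join [' '] L) = L.any (fun cs => PySem.Chars.isIn p cs) := by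
  intro L
  induction L with
  | nil => intro h; exact absurd rfl h
  | cons a L ih =>
    intro _
    cases L with
    | nil => simp [PySem.Chars.join_singleton]
    | cons b rest =>
      rw [PySem.Chars.join_cons_cons]
      have h1 : a ++ [' '] ++ PySem.Chars.join [' '] (b :: rest)
          = a ++ (' ' :: PySem.Chars.join [' '] (b :: rest)) := by simp
      rw [h1]
      rcases Bool.eq_false_or_eq_true (PySem.Chars.isIn p (a ++ (' ' :: PySem.Chars.join [' '] (b :: rest)))) with hT | hF
      · rw [hT]
        have hinf := (PySem.Chars.isIn_iff_infix _ _).mp hT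
        rw [pv_infix_append_cons_iff hp] at hinf
        rcases hinf with h1 | h2
        · simp [List.any_cons, (PySem.Chars.isIn_iff_infix _ _).mpr h1]
        · have := (PySem.Chars.isIn_iff_infix _ _).mpr h2
          rw [ih (by simp)] at this
          simp [List.any_cons, this]
      · rw [hF]
        have hnot := (PySem.Chars.isIn_eq_false_iff _ _).mp hF
        rw [pv_infix_append_cons_iff hp] at hnot
        push Not at hnot
        have ha : PySem.Chars.isIn p a = false :=
          (PySem.Chars.isIn_eq_false_iff _ _).mpr hnot.1
        have hr : PySem.Chars.isIn p (PySem.Chars.join [' '] (b :: rest)) = false :=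
          (PySem.Chars.isIn_eq_false_iff _ _).mpr hnot.2
        rw [ih (by simp)] at hr
        simp only [List.any_cons] at hr ⊢
        rw [ha] at *
        simpa using hr.symm

-- lower distributes over the space-join
theorem pv_lower_join (L : List (List Char)) :
    PySem.Chars.lower (PySem.Chars.join [' '] L)
      = PySem.Chars.join [' '] (L.map PySem.Chars.lower) := by
  induction L with
  | nil => simp [PySem.Chars.join_nil, PySem.Chars.lower]
  | cons a L ih =>
    cases L with
    | nil => simp [PySem.Chars.join_singleton]
    | cons b rest =>
      simp only [List.map_cons]
      rw [PySem.Chars.join_cons_cons, PySem.Chars.join_cons_cons, ← List.map_cons, ← ih]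
      have hsp : PySem.Chars.lowerChar ' ' = ' ' := by decide
      simp [PySem.Chars.lower, List.map_append, hsp]

-- the loop of B computes the two existential flags
theorem pv_blobScan_eq (L : List String) (hx hd : Bool) :
    blobScan L hx hd
      = ((hx || L.any fun s => decide (64 ≤ PySem.Str.len s) && PySem.Str.isIn "xxxxxxx" (PySem.Str.lower s))
        && (hd || L.any fun s => decide (64 ≤ PySem.Str.len s) && PySem.Str.isIn "..-" s)) := by
  induction L generalizing hx hd with
  | nil => simp [blobScan]
  | cons s rest ih =>
    simp only [blobScan]
    by_cases h : 64 ≤ PySem.Str.len s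
    · rw [if_pos h, ih]
      simp only [List.any_cons, h, decide_true, Bool.true_and]
      cases PySem.Str.isIn "xxxxxxx" (PySem.Str.lower s) <;>
        cases PySem.Str.isIn "..-" s <;> cases hx <;> cases hd <;> simp
    · rw [if_neg h, ih]
      simp only [List.any_cons, h, decide_false, Bool.false_and, Bool.false_or]

-- ===== VERDICT (by name: the statement is the Claim_ definition above) =====
theorem looks_ui_asset_blob_py_spec : Claim_equal_looks_ui_asset_blob_py := by
  intro strings _
  unfold Spec_looks_ui_asset_blob_py looks_ui_asset_blob_py looks_ui_asset_blob_py_alt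
  by_cases hlen : strings.length < 2
  · simp [hlen]
  · simp only [if_neg hlen]
    rw [pv_blobScan_eq]
    simp only [Bool.false_or]
    rw [← List.any_filter, ← List.any_filter]
    set long := strings.filter (fun s => 64 ≤ PySem.Str.len s) with hlong
    by_cases hemp : long = []
    · simp [hemp]
    · simp only [if_neg hemp]
      have hmapne : (long.map String.toList) ≠ [] := by
        simpa using hemp
      have hx : PySem.Str.isIn "xxxxxxx" (PySem.Str.lower (PySem.Str.join " " long))
          = long.any (fun s => PySem.Str.isIn "xxxxxxx" (PySem.Str.lower s)) := by
        have hnp : (' ' : Char) ∉ "xxxxxxx".toList := by decide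
        have hne : (long.map String.toList).map PySem.Chars.lower ≠ [] := by
          simpa using hemp
        calc PySem.Str.isIn "xxxxxxx" (PySem.Str.lower (PySem.Str.join " " long))
            = PySem.Chars.isIn "xxxxxxx".toList
                (PySem.Chars.lower (PySem.Chars.join [' '] (long.map String.toList))) := by
              simp [PySem.Str.isIn_eq, PySem.Str.toList_lower, PySem.Str.toList_join]
          _ = PySem.Chars.isIn "xxxxxxx".toList
                (PySem.Chars.join [' '] ((long.map String.toList).map PySem.Chars.lower)) := by
              rw [pv_lower_join]
          _ = ((long.map String.toList).map PySem.Chars.lower).any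
                (fun cs => PySem.Chars.isIn "xxxxxxx".toList cs) := pv_isIn_join hnp _ hne
          _ = long.any (fun s => PySem.Str.isIn "xxxxxxx" (PySem.Str.lower s)) := by
              simp [List.any_map, Function.comp_def, PySem.Str.isIn_eq, PySem.Str.toList_lower]
      have hd : PySem.Str.isIn "..-" (PySem.Str.join " " long)
          = long.any (fun s => PySem.Str.isIn "..-" s) := by
        have hnp : (' ' : Char) ∉ "..-".toList := by decide
        calc PySem.Str.isIn "..-" (PySem.Str.join " " long)
            = PySem.Chars.isIn "..-".toList (PySem.Chars.join [' '] (long.map String.toList)) := by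
              simp [PySem.Str.isIn_eq, PySem.Str.toList_join]
          _ = (long.map String.toList).any (fun cs => PySem.Chars.isIn "..-".toList cs) :=
              pv_isIn_join hnp _ hmapne
          _ = long.any (fun s => PySem.Str.isIn "..-" s) := by
              simp [List.any_map, Function.comp_def, PySem.Str.isIn_eq]
      rw [hx, hd]
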